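-- pv_equiv track=rewrite | github.com/0520hy/Algorithm | 프로그래머스/0/181926. 수 조작하기 1/수 조작하기 1.py | solution
-- ===== SOURCE A (Python) =====
-- def solution(n, control):
--     arr = list(control)
--     for i in arr:
--         if i == "w":
--             n += 1
--         elif i == "s":
--             n -= 1
--         elif i == "d":
--             n += 10
--         else:
--             n -= 10
--     return n
-- ===== SOURCE B (Python) =====
-- def solution(n, control):
--     w = control.count("w")
--     s = control.count("s")
--     d = control.count("d")
--     return n + w - s + 10 * d - 10 * (len(control) - w - s - d)
-- ===== Notes on version B (the rewrite author's own statement) =====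
-- stated objective: simpler
-- what changed: Replaces the branching accumulation loop by three str.count calls and one closed-form arithmetic expression (the catch-all -10 group is len minus the three named counts).
import Mathlib
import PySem

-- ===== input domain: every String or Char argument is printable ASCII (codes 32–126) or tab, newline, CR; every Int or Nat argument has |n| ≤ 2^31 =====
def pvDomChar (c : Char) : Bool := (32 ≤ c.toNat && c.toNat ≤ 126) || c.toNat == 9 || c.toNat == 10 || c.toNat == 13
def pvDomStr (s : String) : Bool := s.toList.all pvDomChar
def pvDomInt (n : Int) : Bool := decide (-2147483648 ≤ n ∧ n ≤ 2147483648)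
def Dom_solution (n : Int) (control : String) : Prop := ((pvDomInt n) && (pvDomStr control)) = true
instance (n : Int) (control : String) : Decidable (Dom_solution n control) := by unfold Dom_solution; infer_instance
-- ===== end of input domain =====

-- B replaces A's branching accumulation loop by per-character counts and one closed-form arithmetic expression (simpler, same cost).


-- ===== PORT A =====
-- literal transliteration: for i in list(control): branch chain updating n
def solution (n : Int) (control : String) : Int :=
  control.toList.foldl (fun n i =>
    if i = 'w' then n + 1
    else if i = 's' then n - 1
    else if i = 'd' then n + 10
    else n - 10) n

-- ===== PORT B =====
-- literal transliteration of Source B: three counts, then one arithmetic expression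
def solution_alt (n : Int) (control : String) : Int :=
  let w : Int := control.toList.count 'w'
  let s : Int := control.toList.count 's'
  let d : Int := control.toList.count 'd'
  n + w - s + 10 * d - 10 * ((control.toList.length : Int) - w - s - d)

-- ===== PRECONDITION & SPEC =====
def Spec_solution (n : Int) (control : String) (out : Int) : Prop := out = solution_alt n control
instance (n : Int) (control : String) (out : Int) : Decidable (Spec_solution n control out) := by unfold Spec_solution; infer_instance

-- ===== CLAIM (what is proved, stated in full; the proofs are below) =====
def Claim_equal_solution : Prop := ∀ (n : Int) (control : String), Dom_solution n control → Spec_solution n control (solution n control)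

-- ===== LEMMAS AND PROOFS =====
theorem solution_fold_eq (l : List Char) (n : Int) :
    l.foldl (fun n i =>
      if i = 'w' then n + 1
      else if i = 's' then n - 1
      else if i = 'd' then n + 10
      else n - 10) n
    = n + l.count 'w' - l.count 's' + 10 * l.count 'd'
        - 10 * ((l.length : Int) - l.count 'w' - l.count 's' - l.count 'd') := by
  induction l generalizing n with
  | nil => simp
  | cons c l ih =>
    simp only [List.foldl_cons, ih, List.count_cons, List.length_cons]
    by_cases hw : c = 'w' <;> by_cases hs : c = 's' <;> by_cases hd : c = 'd' <;>
      simp_all <;> ring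

-- ===== VERDICT (by name: the statement is the Claim_ definition above) =====
theorem solution_spec : Claim_equal_solution := by
  intro n control _
  unfold Spec_solution solution solution_alt
  exact solution_fold_eq _ _
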